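-- pv_equiv track=rewrite | github.com/RobbeW/Data_Statistiek_R | Deel 3 Algoritmiek/04 Gretige algoritmen/17 Frigo/solution/solution.nl_bad.py | frigo
-- ===== SOURCE A (Python) =====
-- def frigo(cijfers):
--     dict = {}
--     for digit in cijfers:
--         if digit in dict:
--             dict[digit] += 1
--         else:
--             dict[digit] = 1
--
--     i = 1
--     while True:
--         not_possible = False
--         num = list(map(int, str(i)))
--         new_dict = {}
--         for digit in num:
--             if digit in new_dict:
--                 new_dict[digit] += 1
--             else:
--                 new_dict[digit] = 1
--
--         for digit, value in new_dict.items():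
--             if digit not in dict or dict[digit] < value:
--                 not_possible = True
--
--         if not_possible:
--             return i
--         i += 1
-- ===== SOURCE B (Python) =====
-- def frigo(cijfers):
--     counts = [0] * 10
--     for x in cijfers:
--         if 0 <= x <= 9:
--             counts[x] += 1
--     best = 1
--     for d in range(2, 10):
--         if counts[d] < counts[best]:
--             best = d
--     rep = best * (10 ** (counts[best] + 1) - 1) // 9
--     zero = 10 ** (counts[0] + 1)
--     return rep if rep <= zero else zero
-- ===== Notes on version B (the rewrite author's own statement) =====
-- stated objective: faster
-- what changed: A searches i=1,2,3,... recounting the digits of every candidate until one needs a digit more often than supplied; B counts the digits 0-9 once and returns the closed-form minimum of the scarcest-nonzero-digit repdigit and the power of ten that beats the zero count.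
import Mathlib
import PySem

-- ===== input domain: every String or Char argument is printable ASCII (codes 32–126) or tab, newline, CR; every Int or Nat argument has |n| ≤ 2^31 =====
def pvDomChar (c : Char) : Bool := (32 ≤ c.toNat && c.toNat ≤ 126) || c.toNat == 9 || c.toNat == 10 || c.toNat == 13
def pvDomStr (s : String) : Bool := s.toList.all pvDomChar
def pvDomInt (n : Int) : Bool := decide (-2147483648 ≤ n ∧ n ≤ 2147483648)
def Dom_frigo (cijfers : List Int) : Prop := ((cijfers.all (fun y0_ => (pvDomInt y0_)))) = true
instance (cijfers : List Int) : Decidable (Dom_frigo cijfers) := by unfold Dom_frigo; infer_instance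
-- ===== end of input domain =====

-- B replaces A's unbounded linear search over candidate integers 1,2,3,… by a digit-count
-- analysis with a closed-form answer (scarcest nonzero-digit repdigit vs power of ten).

-- ===== PORT A =====
-- A's counting loop 'if digit in dict: dict[digit] += 1 else: dict[digit] = 1' (A writes it twice)
def frigoCount (xs : List Int) : PySem.Dict Int Int :=
  xs.foldl (fun d x => if d.contains x then d.insert x (d.getD x 0 + 1) else d.insert x 1)
    PySem.Dict.empty

-- one iteration of A's 'while True' body: num = list(map(int, str(i))); build new_dict; scan items.
-- int(c) never raises here (each c is a decimal digit char of str(i), i ≥ 1), so '.getD 0' is dead.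
def frigoNum (i : Int) : List Int :=
  (PySem.Int.toStr i).toList.map (fun c => (PySem.Int.ofChars? [c]).getD 0)

def frigoCheck (dict : PySem.Dict Int Int) (i : Int) : Bool :=
  let newDict := frigoCount (frigoNum i)
  newDict.items.foldl
    (fun np p => if (!(dict.contains p.1)) || decide (dict.getD p.1 0 < p.2) then true else np)
    false

-- A's 'while True: … i += 1'. The fuel only bounds the recursion depth; it is provably never
-- exhausted (the check succeeds at latest at 10^(len+1), see frigo_loop_eq / frigo_spec), so the
-- 0-fuel branch is dead code and this computes exactly A's loop.
def frigoLoop (dict : PySem.Dict Int Int) : Nat → Int → Int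
  | 0, i => i
  | f + 1, i => if frigoCheck dict i then i else frigoLoop dict f (i + 1)

def frigo (cijfers : List Int) : Int :=
  let dict := frigoCount cijfers
  frigoLoop dict (10 ^ (cijfers.length + 1)) 1

-- ===== PORT B =====
def frigo_alt (cijfers : List Int) : Int :=
  let counts : List Int := cijfers.foldl
    (fun c x => if 0 ≤ x ∧ x ≤ 9 then c.set x.toNat (c.getD x.toNat 0 + 1) else c)
    (List.replicate 10 0)
  -- the indices best and d lie in 0..9, so plain List.getD is Python's counts[·] here
  let best : Int := (PySem.List.pyRange 2 10 1).foldl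
    (fun b d => if counts.getD d.toNat 0 < counts.getD b.toNat 0 then d else b) 1
  let rep : Int := PySem.Int.floordiv (best * (10 ^ (counts.getD best.toNat 0 + 1).toNat - 1)) 9
  let zero : Int := 10 ^ (counts.getD 0 0 + 1).toNat
  if rep ≤ zero then rep else zero

-- ===== PRECONDITION & SPEC =====
def Spec_frigo (cijfers : List Int) (out : Int) : Prop := out = frigo_alt cijfers
instance (cijfers : List Int) (out : Int) : Decidable (Spec_frigo cijfers out) := by
  unfold Spec_frigo; infer_instance

-- ===== CLAIM (what is proved, stated in full; the proofs are below) =====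
def Claim_equal_frigo : Prop := ∀ (cijfers : List Int), Dom_frigo cijfers → Spec_frigo cijfers (frigo cijfers)

-- ===== LEMMAS AND PROOFS =====

-- the repdigit d·(10^k−1)/9 = "ddd…d" (k copies), recursively
def repN (d : Nat) : Nat → Nat
  | 0 => 0
  | k + 1 => 10 * repN d k + d

-- digit count of the input list, as naturals
def cntN (cijfers : List Int) (d : Nat) : Nat := cijfers.count (d : Int)

-- n is "impossible": some digit of n occurs in n more often than in cijfers
def Bad (cijfers : List Int) (n : Nat) : Prop :=
  ∃ d ∈ Nat.digits 10 n, cntN cijfers d < (Nat.digits 10 n).count d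

-- ---- Nat.toDigits versus Nat.digits ----
theorem toDigitsCore_succ (f n : Nat) (acc : List Char) :
    Nat.toDigitsCore 10 (f + 1) n acc =
      (if n / 10 = 0 then Nat.digitChar (n % 10) :: acc
       else Nat.toDigitsCore 10 f (n / 10) (Nat.digitChar (n % 10) :: acc)) := by
  rw [Nat.toDigitsCore]

theorem toDigitsCore_eq (f n : Nat) (acc : List Char) (h : n < f) :
    Nat.toDigitsCore 10 f n acc =
      (if n = 0 then ['0'] else (Nat.digits 10 n).reverse.map Nat.digitChar) ++ acc := by
  induction f generalizing n acc with
  | zero => omega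
  | succ f ih =>
    rw [toDigitsCore_succ]
    by_cases h0 : n / 10 = 0
    · have hn : n < 10 := by omega
      rw [if_pos h0]
      by_cases hz : n = 0
      · subst hz; simp [Nat.digitChar]
      · rw [if_neg hz, Nat.digits_def' (by norm_num) (show 0 < n by omega)]
        simp [h0, Nat.mod_eq_of_lt hn]
    · rw [if_neg h0, if_neg (by omega),
        Nat.digits_def' (b := 10) (by norm_num) (show 0 < n by omega),
        ih (n / 10) _ (by omega), if_neg h0]
      simp

theorem toDigits_eq (n : Nat) (h : 0 < n) :
    Nat.toDigits 10 n = (Nat.digits 10 n).reverse.map Nat.digitChar := by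
  rw [Nat.toDigits, toDigitsCore_eq (n + 1) n [] (by omega), if_neg (by omega)]
  simp

-- parsing a single digit char
theorem parse_digitChar (d : Nat) (h : d < 10) :
    (PySem.Int.ofChars? [Nat.digitChar d]).getD 0 = (d : Int) := by
  interval_cases d <;> decide

-- A's num list for i ≥ 1 is the (big-endian) digit list of i
theorem num_eq (i : Int) (h : 1 ≤ i) :
    frigoNum i = List.map (fun d : Nat => (d : Int)) ((Nat.digits 10 i.toNat).reverse) := by
  unfold frigoNum
  rw [PySem.Int.toList_toStr, PySem.Int.toChars, if_neg (by omega),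
    toDigits_eq i.toNat (by omega), List.map_map]
  apply List.map_congr_left
  intro d hd
  have hd10 : d < 10 := Nat.digits_lt_base (by norm_num) (List.mem_reverse.mp hd)
  exact parse_digitChar d hd10

-- the if-in-else counting loop is collections.Counter
theorem frigoCount_eq (xs : List Int) : frigoCount xs = PySem.Dict.counter xs := by
  unfold frigoCount
  have hfe : (fun (d : PySem.Dict Int Int) (x : Int) =>
      if d.contains x then d.insert x (d.getD x 0 + 1) else d.insert x 1)
      = fun d x => d.insert x (d.getD x 0 + 1) := by
    funext d x
    by_cases hc : d.contains x
    · rw [if_pos hc]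
    · rw [if_neg hc, PySem.Dict.getD_of_not_contains d 0 (by simpa using hc)]
      norm_num
  rw [hfe, PySem.Dict.foldl_insert_getD_add_one_eq_counter]

-- folding 'if cond p: flag = True' over a list is List.any
theorem foldl_if_any {α : Type} (cond : α → Bool) (l : List α) (b : Bool) :
    l.foldl (fun np p => if cond p then true else np) b = (b || l.any cond) := by
  induction l generalizing b with
  | nil => simp
  | cons x xs ih =>
    rw [List.foldl_cons, ih, List.any_cons]
    by_cases h : cond x <;> simp [h]

-- the check is exactly Bad
theorem check_iff (cijfers : List Int) (i : Int) (h : 1 ≤ i) :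
    frigoCheck (frigoCount cijfers) i = true ↔ Bad cijfers i.toNat := by
  simp only [frigoCheck]
  rw [num_eq i h, frigoCount_eq cijfers, frigoCount_eq, PySem.Dict.items_counter,
    foldl_if_any (fun p : Int × Int =>
      (!(PySem.Dict.counter cijfers).contains p.1) || decide ((PySem.Dict.counter cijfers).getD p.1 0 < p.2))]
  simp only [Bool.false_or, List.any_map, List.any_eq_true, Function.comp]
  constructor
  · rintro ⟨k, hk, hcond⟩
    rw [PySem.Set.mem_ofList] at hk
    simp only [List.mem_map, List.mem_reverse] at hk
    obtain ⟨d, hd, rfl⟩ := hk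
    refine ⟨d, hd, ?_⟩
    have hcnt : List.count ((d : Nat) : Int)
        (List.map (fun d : Nat => (d : Int)) (Nat.digits 10 i.toNat).reverse)
        = (Nat.digits 10 i.toNat).count d := by
      rw [List.count_map_of_injective _ _ (fun a b => by exact_mod_cast id), List.count_reverse]
    simp only [PySem.Dict.contains_counter, PySem.Dict.getD_counter, hcnt,
      Bool.or_eq_true, Bool.not_eq_true', decide_eq_true_eq] at hcond
    rcases hcond with hnc | hlt
    · have hnm : ((d : Nat) : Int) ∉ cijfers := by
        simpa [List.contains_iff_mem] using hnc
      have : cntN cijfers d = 0 := List.count_eq_zero.mpr hnm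
      have hpos : 0 < (Nat.digits 10 i.toNat).count d := List.count_pos_iff.mpr hd
      omega
    · have : (cntN cijfers d : Int) < ((Nat.digits 10 i.toNat).count d : Int) := by
        exact_mod_cast hlt
      exact_mod_cast this
  · rintro ⟨d, hd, hlt⟩
    refine ⟨((d : Nat) : Int), ?_, ?_⟩
    · rw [PySem.Set.mem_ofList]
      simp only [List.mem_map, List.mem_reverse]
      exact ⟨d, hd, rfl⟩
    · have hcnt : List.count ((d : Nat) : Int)
          (List.map (fun d : Nat => (d : Int)) (Nat.digits 10 i.toNat).reverse)
          = (Nat.digits 10 i.toNat).count d := by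
        rw [List.count_map_of_injective _ _ (fun a b => by exact_mod_cast id), List.count_reverse]
      simp only [PySem.Dict.contains_counter, PySem.Dict.getD_counter, hcnt,
        Bool.or_eq_true, Bool.not_eq_true', decide_eq_true_eq]
      right
      exact_mod_cast hlt

-- the loop returns the least i with a true check
theorem frigo_loop_eq (dict : PySem.Dict Int Int) (M : Int) (hM : frigoCheck dict M = true) :
    ∀ (fuel : Nat) (i : Int), i ≤ M → (∀ j, i ≤ j → j < M → frigoCheck dict j = false) →
      (M - i).toNat < fuel → frigoLoop dict fuel i = M := by
  intro fuel
  induction fuel with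
  | zero => intro i _ _ hf; omega
  | succ f ih =>
    intro i hi hbelow hf
    rw [frigoLoop]
    by_cases hc : frigoCheck dict i = true
    · rw [if_pos hc]
      by_contra hne
      have hlt : i < M := lt_of_le_of_ne hi (fun e => hne e)
      have := hbelow i le_rfl hlt
      rw [hc] at this; exact absurd this (by simp)
    · rw [if_neg hc]
      have hiM : i < M := by
        rcases lt_or_eq_of_le hi with h | h
        · exact h
        · exact absurd (h ▸ hM) hc
      exact ih (i + 1) (by omega) (fun j hj hjM => hbelow j (by omega) hjM) (by omega)

-- ---- arithmetic facts about repN and powers ----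
theorem repN_lt_pow (d k : Nat) (h : d ≤ 9) : repN d k < 10 ^ k := by
  induction k with
  | zero => simp [repN]
  | succ k ih => simp only [repN, pow_succ]; omega

theorem repN_ge_pow (d k : Nat) (h : 1 ≤ d) : 10 ^ k ≤ repN d (k + 1) := by
  induction k with
  | zero => simp [repN]; omega
  | succ k ih => simp only [repN, pow_succ] at *; omega

theorem repN_mono_digit (d e k : Nat) (h : d ≤ e) : repN d k ≤ repN e k := by
  induction k with
  | zero => simp [repN]
  | succ k ih => simp only [repN]; omega

theorem repN_mono_len (d : Nat) {k k' : Nat} (h : k ≤ k') : repN d k ≤ repN d k' := by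
  induction h with
  | refl => exact le_rfl
  | step _ ih => rename_i m _; simp only [repN]; omega

theorem repN_pos (d k : Nat) (hd : 1 ≤ d) (hk : 1 ≤ k) : 0 < repN d k := by
  cases k with
  | zero => omega
  | succ k => simp only [repN]; omega

theorem nine_mul_repN (d k : Nat) : 9 * repN d k + d = d * 10 ^ k := by
  induction k with
  | zero => simp [repN]
  | succ k ih => simp only [repN, pow_succ]; nlinarith

-- digits of the repdigit
theorem digits_repN (d k : Nat) (hd : 1 ≤ d) (hd9 : d ≤ 9) :
    Nat.digits 10 (repN d k) = List.replicate k d := by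
  induction k with
  | zero => simp [repN]
  | succ k ih =>
    have hpos : 0 < repN d (k + 1) := repN_pos d (k + 1) hd (by omega)
    rw [Nat.digits_def' (by norm_num) hpos]
    simp only [repN] at *
    have h1 : (10 * repN d k + d) % 10 = d := by omega
    have h2 : (10 * repN d k + d) / 10 = repN d k := by omega
    rw [h1, h2, ih, List.replicate_succ]

-- digits of 10^k
theorem digits_pow10 (k : Nat) : Nat.digits 10 (10 ^ k) = List.replicate k 0 ++ [1] := by
  induction k with
  | zero => simp
  | succ k ih =>
    have hpos : 0 < (10 : Nat) ^ (k + 1) := by positivity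
    rw [Nat.digits_def' (by norm_num) hpos, pow_succ]
    have h1 : (10 : Nat) ^ k * 10 % 10 = 0 := by omega
    have h2 : (10 : Nat) ^ k * 10 / 10 = 10 ^ k := by omega
    rw [h1, h2, ih, List.replicate_succ]
    simp

-- any n with k copies of the digit d ≥ 1 is at least the k-repdigit of d
theorem ge_repN_of_count (d : Nat) :
    ∀ n : Nat, repN d ((Nat.digits 10 n).count d) ≤ n := by
  intro n
  induction n using Nat.strong_induction_on with
  | _ n ih =>
    by_cases h0 : n = 0
    · subst h0; simp [repN]
    · rw [Nat.digits_def' (by norm_num) (Nat.pos_of_ne_zero h0)]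
      have hq : n / 10 < n := Nat.div_lt_self (by omega) (by norm_num)
      have ihq := ih (n / 10) hq
      simp only [List.count_cons, beq_iff_eq]
      by_cases hr : n % 10 = d
      · rw [if_pos hr]
        simp only [repN]
        omega
      · rw [if_neg hr]
        simp only [Nat.add_zero]
        omega

-- any n ≥ 1 with k zero digits is at least 10^k
theorem ge_pow_of_count_zero :
    ∀ n : Nat, 1 ≤ n → 10 ^ ((Nat.digits 10 n).count 0) ≤ n := by
  intro n
  induction n using Nat.strong_induction_on with
  | _ n ih =>
    intro h1
    rw [Nat.digits_def' (by norm_num) (by omega)]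
    simp only [List.count_cons, beq_iff_eq]
    by_cases hq0 : n / 10 = 0
    · rw [hq0, if_neg (show ¬ n % 10 = 0 by omega)]
      simp
      omega
    · have hq : n / 10 < n := Nat.div_lt_self (by omega) (by norm_num)
      have ihq := ih (n / 10) hq (by omega)
      by_cases hr : n % 10 = 0
      · rw [if_pos hr, pow_succ]
        omega
      · rw [if_neg hr]
        simp only [Nat.add_zero]
        omega

-- ---- B-side characterisations ----
theorem counts_fold_getD (l : List Int) :
    ∀ (c : List Int), c.length = 10 → ∀ j : Nat, j < 10 →
    (l.foldl (fun c x => if 0 ≤ x ∧ x ≤ 9 then c.set x.toNat (c.getD x.toNat 0 + 1) else c) c).getD j 0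
      = c.getD j 0 + (l.count ((j : Nat) : Int) : Int) := by
  induction l with
  | nil => intro c _ j _; simp
  | cons x l ih =>
    intro c hc j hj
    rw [List.foldl_cons]
    simp only [List.count_cons, beq_iff_eq]
    by_cases hx : 0 ≤ x ∧ x ≤ 9
    · rw [if_pos hx]
      have hlen : (c.set x.toNat (c.getD x.toNat 0 + 1)).length = 10 := by
        simpa using hc
      rw [ih _ hlen j hj]
      by_cases hxj : x = ((j : Nat) : Int)
      · have hxn : x.toNat = j := by omega
        rw [if_pos hxj]
        have hset : (c.set x.toNat (c.getD x.toNat 0 + 1)).getD j 0 = c.getD j 0 + 1 := by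
          rw [List.getD_eq_getElem?_getD, List.getElem?_set, if_pos hxn, if_pos (by omega)]
          rw [hxn]
          simp
        rw [hset]
        push_cast
        ring
      · have hxn : x.toNat ≠ j := by omega
        rw [if_neg hxj]
        have : (c.set x.toNat (c.getD x.toNat 0 + 1)).getD j 0 = c.getD j 0 := by
          rw [List.getD_eq_getElem?_getD, List.getElem?_set, if_neg hxn,
            List.getD_eq_getElem?_getD]
        rw [this]
        push_cast
        ring
    · rw [if_neg hx]
      have hxj : ¬ (x = ((j : Nat) : Int)) := by omega
      rw [ih _ hc j hj, if_neg hxj]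
      push_cast
      ring

-- the running-argmin fold: result is a member, minimal, and strictly better than anything before it
theorem argmin_fold (cnt : Int → Int) :
    ∀ (L : List Int) (b : Int), (b :: L).Pairwise (· < ·) →
      ((L.foldl (fun b d => if cnt d < cnt b then d else b) b) ∈ b :: L) ∧
      (∀ d ∈ b :: L, cnt (L.foldl (fun b d => if cnt d < cnt b then d else b) b) ≤ cnt d) ∧
      (∀ d ∈ b :: L, d < (L.foldl (fun b d => if cnt d < cnt b then d else b) b) →
        cnt (L.foldl (fun b d => if cnt d < cnt b then d else b) b) < cnt d) := by
  intro L
  induction L with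
  | nil => intro b _; simp
  | cons x L ih =>
    intro b hp
    rw [List.pairwise_cons] at hp
    obtain ⟨hblt, hpx⟩ := hp
    rw [List.foldl_cons]
    by_cases hx : cnt x < cnt b
    · rw [if_pos hx]
      obtain ⟨h1, h2, h3⟩ := ih x hpx
      refine ⟨List.mem_cons_of_mem b h1, ?_, ?_⟩
      · intro d hd
        rcases List.mem_cons.mp hd with rfl | hd'
        · exact le_of_lt (lt_of_le_of_lt (h2 x (List.mem_cons_self)) hx)
        · exact h2 d hd'
      · intro d hd hdr
        rcases List.mem_cons.mp hd with rfl | hd'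
        · exact lt_of_le_of_lt (h2 x (List.mem_cons_self)) hx
        · exact h3 d hd' hdr
    · rw [if_neg hx]
      rw [List.pairwise_cons] at hpx
      obtain ⟨hxlt, hpL⟩ := hpx
      have hpbL : (b :: L).Pairwise (· < ·) := by
        rw [List.pairwise_cons]
        exact ⟨fun a ha => hblt a (List.mem_cons_of_mem x ha), hpL⟩
      obtain ⟨h1, h2, h3⟩ := ih b hpbL
      refine ⟨?_, ?_, ?_⟩
      · rcases List.mem_cons.mp h1 with h | h
        · rw [h]; exact List.mem_cons_self
        · exact List.mem_cons_of_mem b (List.mem_cons_of_mem x h)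
      · intro d hd
        rcases List.mem_cons.mp hd with rfl | hd'
        · exact h2 d List.mem_cons_self
        · rcases List.mem_cons.mp hd' with rfl | hd''
          · exact le_trans (h2 b List.mem_cons_self) (not_lt.mp hx)
          · exact h2 d (List.mem_cons_of_mem b hd'')
      · intro d hd hdr
        set r := L.foldl (fun b d => if cnt d < cnt b then d else b) b with hrdef
        rcases List.mem_cons.mp hd with rfl | hd'
        · exact h3 d List.mem_cons_self hdr
        · rcases List.mem_cons.mp hd' with rfl | hd''
          · -- d is the head x, d < r; then r ∈ L, and cnt r < cnt b ≤ cnt d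
            have hrL : r ∈ L := by
              rcases List.mem_cons.mp h1 with h | h
              · exfalso
                have hbd : b < d := hblt d List.mem_cons_self
                omega
              · exact h
            have hbr : b < r := hblt r (List.mem_cons_of_mem d hrL)
            exact lt_of_lt_of_le (h3 b List.mem_cons_self hbr) (not_lt.mp hx)
          · exact h3 d (List.mem_cons_of_mem b hd'') hdr

-- A's loop, given the argmin digit, returns B's closed-form value
theorem main_core (cijfers : List Int) (bN : Nat) (hb1 : 1 ≤ bN) (hb9 : bN ≤ 9)
    (hmin : ∀ e, 1 ≤ e → e ≤ 9 → cntN cijfers bN ≤ cntN cijfers e)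
    (hstrict : ∀ e, 1 ≤ e → e < bN → cntN cijfers bN < cntN cijfers e) :
    frigoLoop (frigoCount cijfers) (10 ^ (cijfers.length + 1)) 1
      = ((min (repN bN (cntN cijfers bN + 1)) (10 ^ (cntN cijfers 0 + 1)) : Nat) : Int) := by
  set k := cntN cijfers bN + 1 with hk
  set RN := repN bN k with hRN
  set ZN := 10 ^ (cntN cijfers 0 + 1) with hZN
  set MN := min RN ZN with hMN
  have hRpos : 1 ≤ RN := repN_pos bN k hb1 (by omega)
  have hZpos : 1 ≤ ZN := Nat.one_le_pow _ _ (by norm_num)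
  have hMpos : 1 ≤ MN := le_min hRpos hZpos
  have hMtoNat : ((MN : Int)).toNat = MN := Int.toNat_natCast MN
  -- the check succeeds at MN
  have hMF : frigoCheck (frigoCount cijfers) ((MN : Int)) = true := by
    rw [check_iff cijfers _ (by exact_mod_cast hMpos), hMtoNat]
    by_cases hRZ : RN ≤ ZN
    · rw [hMN, min_eq_left hRZ, hRN]
      unfold Bad
      rw [digits_repN bN k hb1 hb9]
      refine ⟨bN, List.mem_replicate.mpr ⟨by omega, rfl⟩, ?_⟩
      rw [List.count_replicate]
      simp only [BEq.rfl, if_pos]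
      omega
    · rw [hMN, min_eq_right (le_of_lt (not_le.mp hRZ)), hZN]
      unfold Bad
      rw [digits_pow10]
      refine ⟨0, List.mem_append_left _ (List.mem_replicate.mpr ⟨by omega, rfl⟩), ?_⟩
      rw [List.count_append, List.count_replicate]
      simp
  -- the check fails strictly below MN
  have hbelow : ∀ j : Int, 1 ≤ j → j < (MN : Int) →
      frigoCheck (frigoCount cijfers) j = false := by
    intro j hj1 hjM
    by_contra hne
    have hT : frigoCheck (frigoCount cijfers) j = true := by
      cases hcv : frigoCheck (frigoCount cijfers) j
      · exact absurd hcv hne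
      · rfl
    rw [check_iff cijfers j hj1] at hT
    obtain ⟨d, hd, hcnt⟩ := hT
    set n := j.toNat with hn
    have hn1 : 1 ≤ n := by omega
    have hnM : n < MN := by omega
    have hd10 : d < 10 := Nat.digits_lt_base (by norm_num) hd
    by_cases hd0 : d = 0
    · subst hd0
      have hge := ge_pow_of_count_zero n hn1
      have hpow : ZN ≤ 10 ^ ((Nat.digits 10 n).count 0) :=
        Nat.pow_le_pow_right (by norm_num) (by unfold cntN at hcnt ⊢; omega)
      have hMle : MN ≤ ZN := min_le_right _ _
      omega
    · have hd1 : 1 ≤ d := by omega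
      have hrle := ge_repN_of_count d n
      have hcm : cntN cijfers bN ≤ cntN cijfers d := hmin d hd1 (by omega)
      by_cases heq : cntN cijfers d = cntN cijfers bN
      · have hdb : bN ≤ d := by
          by_contra hlt
          have := hstrict d hd1 (by omega)
          omega
        have h1 : RN ≤ repN d k := repN_mono_digit bN d k hdb
        have h2 : repN d k ≤ repN d ((Nat.digits 10 n).count d) :=
          repN_mono_len d (by omega)
        have hMle : MN ≤ RN := min_le_left _ _
        omega
      · have h1 : 10 ^ k ≤ repN d (k + 1) := repN_ge_pow d k hd1
        have h2 : repN d (k + 1) ≤ repN d ((Nat.digits 10 n).count d) :=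
          repN_mono_len d (by omega)
        have h3 : RN < 10 ^ k := repN_lt_pow bN k hb9
        have hMle : MN ≤ RN := min_le_left _ _
        omega
  -- fuel is sufficient
  have hc0len : cntN cijfers 0 ≤ cijfers.length := List.count_le_length
  have hfuel : ZN ≤ 10 ^ (cijfers.length + 1) :=
    Nat.pow_le_pow_right (by norm_num) (by omega)
  have hMZ : MN ≤ ZN := min_le_right _ _
  exact frigo_loop_eq (frigoCount cijfers) (MN : Int) hMF (10 ^ (cijfers.length + 1)) 1
    (by exact_mod_cast hMpos) (fun j hj hjM => hbelow j hj hjM) (by omega)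

-- ===== VERDICT (by name: the statement is the Claim_ definition above) =====
theorem frigo_spec : Claim_equal_frigo := by
  unfold Claim_equal_frigo Spec_frigo
  intro cijfers _
  simp only [frigo, frigo_alt]
  rw [show PySem.List.pyRange 2 10 1 = [2,3,4,5,6,7,8,9] from by decide]
  set C : List Int := cijfers.foldl
    (fun c x => if 0 ≤ x ∧ x ≤ 9 then c.set x.toNat (c.getD x.toNat 0 + 1) else c)
    (List.replicate 10 0) with hCdef
  have hCget : ∀ j : Nat, j < 10 → C.getD j 0 = (cntN cijfers j : Int) := by
    intro j hj
    rw [hCdef, counts_fold_getD cijfers (List.replicate 10 0) (by simp) j hj]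
    have hrep0 : (List.replicate 10 (0 : Int)).getD j 0 = 0 := by
      interval_cases j <;> rfl
    rw [hrep0]
    simp [cntN]
  set bI : Int := ([2,3,4,5,6,7,8,9] : List Int).foldl
    (fun b d => if C.getD d.toNat 0 < C.getD b.toNat 0 then d else b) 1 with hbdef
  obtain ⟨hb1, hb2, hb3⟩ :=
    argmin_fold (fun d : Int => C.getD d.toNat 0) [2,3,4,5,6,7,8,9] 1 (by decide)
  rw [← hbdef] at hb1 hb2 hb3
  have h19 : 1 ≤ bI ∧ bI ≤ 9 := by
    simp only [List.mem_cons, List.not_mem_nil, or_false] at hb1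
    rcases hb1 with h | h | h | h | h | h | h | h | h <;> omega
  set bN : Nat := bI.toNat with hbNdef
  have hbIN : bI = (bN : Int) := by omega
  have hbN1 : 1 ≤ bN := by omega
  have hbN9 : bN ≤ 9 := by omega
  have hmin : ∀ e : Nat, 1 ≤ e → e ≤ 9 → cntN cijfers bN ≤ cntN cijfers e := by
    intro e h1e h9e
    have hmem : ((e : Nat) : Int) ∈ (1 : Int) :: [2,3,4,5,6,7,8,9] := by
      interval_cases e <;> simp
    have h := hb2 _ hmem
    simp only [Int.toNat_natCast] at h
    rw [hCget bN (by omega), hCget e (by omega)] at h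
    exact_mod_cast h
  have hstrict : ∀ e : Nat, 1 ≤ e → e < bN → cntN cijfers bN < cntN cijfers e := by
    intro e h1e hlt
    have h9e : e ≤ 9 := by omega
    have hmem : ((e : Nat) : Int) ∈ (1 : Int) :: [2,3,4,5,6,7,8,9] := by
      interval_cases e <;> simp
    have hlt' : ((e : Nat) : Int) < bI := by omega
    have h := hb3 _ hmem hlt'
    simp only [Int.toNat_natCast] at h
    rw [hCget bN (by omega), hCget e (by omega)] at h
    exact_mod_cast h
  rw [hCget bN (by omega), hCget 0 (by norm_num)]
  rw [show ((cntN cijfers bN : Int) + 1).toNat = cntN cijfers bN + 1 from by omega,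
      show ((cntN cijfers 0 : Int) + 1).toNat = cntN cijfers 0 + 1 from by omega]
  have h10 : 1 ≤ (10 : Nat) ^ (cntN cijfers bN + 1) := Nat.one_le_pow _ _ (by norm_num)
  have hrep : PySem.Int.floordiv (bI * ((10 : Int) ^ (cntN cijfers bN + 1) - 1)) 9
      = ((repN bN (cntN cijfers bN + 1) : Nat) : Int) := by
    have hspell : bI * ((10 : Int) ^ (cntN cijfers bN + 1) - 1)
        = (((bN * (10 ^ (cntN cijfers bN + 1) - 1) : Nat)) : Int) := by
      rw [hbIN]; push_cast [h10]; ring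
    rw [hspell, show (9 : Int) = ((9 : Nat) : Int) from by norm_num, PySem.Int.floordiv_natCast]
    congr 1
    have hnm := nine_mul_repN bN (cntN cijfers bN + 1)
    have hms : bN * (10 ^ (cntN cijfers bN + 1) - 1)
        = bN * 10 ^ (cntN cijfers bN + 1) - bN := by
      rw [Nat.mul_sub, Nat.mul_one]
    have h9r : bN * (10 ^ (cntN cijfers bN + 1) - 1)
        = 9 * repN bN (cntN cijfers bN + 1) := by omega
    rw [h9r, Nat.mul_div_cancel_left _ (by norm_num)]
  rw [hrep,
    show (10 : Int) ^ (cntN cijfers 0 + 1) = ((10 ^ (cntN cijfers 0 + 1) : Nat) : Int) from by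
      push_cast; ring]
  rw [main_core cijfers bN hbN1 hbN9 hmin hstrict]
  split_ifs with hle
  · rw [min_eq_left (by exact_mod_cast hle)]
  · rw [min_eq_right (le_of_lt (by exact_mod_cast not_le.mp hle))]
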